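-- pv_equiv track=rewrite | github.com/IntelliCredence/test | backend.py | summarize_elements
-- ===== SOURCE A (Python) =====
-- from typing import Dict, List, Any
--
-- def summarize_elements(frames_data: List[Dict]) -> Dict:
--     """Aggregate element statistics from frames."""
--     element_counts = {
--         'buttons': 0,
--         'input_fields': 0,
--         'icons': 0,
--         'links': 0,
--         'headings': 0,
--         'text_elements': 0,
--         'containers': 0
--     }
--
--     for frame in frames_data:
--         analysis = frame.get('analysis', {})
--         element_counts['buttons'] += len(analysis.get('buttons', []))
--         element_counts['input_fields'] += len(analysis.get('input_fields', []))
--         element_counts['icons'] += len(analysis.get('icons', []))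
--         element_counts['links'] += len(analysis.get('links', []))
--         element_counts['headings'] += len(analysis.get('headings_and_titles', []))
--         element_counts['text_elements'] += len(analysis.get('body_text', []))
--         element_counts['containers'] += len(analysis.get('containers_cards', []))
--
--     return element_counts
-- ===== SOURCE B (Python) =====
-- from typing import Dict, List, Any
--
-- def summarize_elements(frames_data: List[Dict]) -> Dict:
--     """Aggregate element statistics from frames."""
--     # Pass 1: one data-driven counter over EVERY key that actually occurs in the
--     # frames' analyses (no per-key .get scans).
--     counts = {}
--     for frame in frames_data:
--         for key, items in frame.get('analysis', {}).items():
--             counts[key] = counts.get(key, 0) + len(items)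
--     # Pass 2: project the counter onto the seven output keys via a rename map.
--     rename = {'headings': 'headings_and_titles',
--               'text_elements': 'body_text',
--               'containers': 'containers_cards'}
--     return {k: counts.get(rename.get(k, k), 0)
--             for k in ('buttons', 'input_fields', 'icons', 'links',
--                       'headings', 'text_elements', 'containers')}
-- ===== Notes on version B (the rewrite author's own statement) =====
-- stated objective: alternative
-- what changed: Instead of accumulating seven fixed counters with a per-key analysis.get scan in each frame, B builds one data-driven counter over whatever keys actually occur in the analyses and then projects it onto the seven output keys through a rename map.
import Mathlib
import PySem

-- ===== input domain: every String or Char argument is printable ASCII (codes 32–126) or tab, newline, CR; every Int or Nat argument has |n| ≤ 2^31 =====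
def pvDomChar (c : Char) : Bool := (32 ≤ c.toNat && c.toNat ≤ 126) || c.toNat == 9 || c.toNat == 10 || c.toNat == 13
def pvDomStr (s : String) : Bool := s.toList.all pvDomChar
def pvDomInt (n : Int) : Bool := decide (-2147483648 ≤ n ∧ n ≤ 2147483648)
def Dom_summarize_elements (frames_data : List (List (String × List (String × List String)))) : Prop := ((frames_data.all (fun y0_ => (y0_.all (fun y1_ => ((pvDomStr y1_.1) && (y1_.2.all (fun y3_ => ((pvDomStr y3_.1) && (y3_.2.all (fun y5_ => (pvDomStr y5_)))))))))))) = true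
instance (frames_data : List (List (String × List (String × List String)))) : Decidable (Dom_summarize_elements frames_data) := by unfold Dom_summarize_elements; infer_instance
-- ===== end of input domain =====

-- B replaces A's seven fixed counters (one analysis.get per key per frame) with one
-- data-driven counter over all occurring analysis keys, projected onto the seven
-- output keys through a rename map (alternative algorithm, similar cost).

-- ===== PORT A =====
-- len(analysis.get(key, [])) for one analysis dict
def seLen (analysis : List (String × List String)) (key : String) : Int :=
  ((PySem.Dict.mk analysis).getD key []).length

-- one iteration of A's 'for frame in frames_data' body
def seStep (ec : PySem.Dict String Int)
    (frame : List (String × List (String × List String))) : PySem.Dict String Int :=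
  let analysis := (PySem.Dict.mk frame).getD "analysis" []
  -- element_counts[k] += len(...): the key is always present, so += is modify with default 0
  let ec := ec.modify "buttons" 0 (· + seLen analysis "buttons")
  let ec := ec.modify "input_fields" 0 (· + seLen analysis "input_fields")
  let ec := ec.modify "icons" 0 (· + seLen analysis "icons")
  let ec := ec.modify "links" 0 (· + seLen analysis "links")
  let ec := ec.modify "headings" 0 (· + seLen analysis "headings_and_titles")
  let ec := ec.modify "text_elements" 0 (· + seLen analysis "body_text")
  ec.modify "containers" 0 (· + seLen analysis "containers_cards")

def summarize_elements (frames_data : List (List (String × List (String × List String)))) : List (String × Int) :=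
  let element_counts : PySem.Dict String Int := PySem.Dict.ofList
    [("buttons", 0), ("input_fields", 0), ("icons", 0), ("links", 0),
     ("headings", 0), ("text_elements", 0), ("containers", 0)]
  (frames_data.foldl seStep element_counts).items

-- ===== PORT B =====
-- rename = {...}
def seRename : PySem.Dict String String := PySem.Dict.mk
  [("headings", "headings_and_titles"), ("text_elements", "body_text"),
   ("containers", "containers_cards")]

-- counts[key] = counts.get(key, 0) + len(items), over analysis.items() of every frame
def seCount (frames_data : List (List (String × List (String × List String)))) : PySem.Dict String Int :=
  frames_data.foldl (fun counts frame =>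
    ((PySem.Dict.mk frame).getD "analysis" []).foldl
      (fun counts p => counts.insert p.1 (counts.getD p.1 0 + p.2.length)) counts)
    PySem.Dict.empty

def summarize_elements_alt (frames_data : List (List (String × List (String × List String)))) : List (String × Int) :=
  let counts := seCount frames_data
  ["buttons", "input_fields", "icons", "links", "headings", "text_elements", "containers"].map
    (fun k => (k, counts.getD (seRename.getD k k) 0))

-- ===== PRECONDITION & SPEC =====
-- Pre_ excludes association lists in which some inner (analysis) dict has duplicate
-- keys: those do not represent any Python dict, and A's first-match .get versus B's
-- sum over all occurrences there is an accident of the encoding.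
def Pre_summarize_elements (frames_data : List (List (String × List (String × List String)))) : Prop :=
  ∀ fr ∈ frames_data, ∀ p ∈ fr, (p.2.map Prod.fst).Nodup
instance (frames_data : List (List (String × List (String × List String)))) : Decidable (Pre_summarize_elements frames_data) := by unfold Pre_summarize_elements; infer_instance

def pvWitness_summarize_elements : (List (List (String × List (String × List String)))) :=
  [[("analysis", [("buttons", ["b1", "b2"]), ("body_text", ["t"])])],
   [("other", [])]]

def Spec_summarize_elements (frames_data : List (List (String × List (String × List String)))) (out : List (String × Int)) : Prop := out = summarize_elements_alt frames_data
instance (frames_data : List (List (String × List (String × List String)))) (out : List (String × Int)) : Decidable (Spec_summarize_elements frames_data out) := by unfold Spec_summarize_elements; infer_instance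

-- ===== CLAIM (what is proved, stated in full; the proofs are below) =====
def Claim_equal_summarize_elements : Prop := ∀ (frames_data : List (List (String × List (String × List String)))), Dom_summarize_elements frames_data → Pre_summarize_elements frames_data → Spec_summarize_elements frames_data (summarize_elements frames_data)

-- ===== LEMMAS AND PROOFS =====

-- per-frame count for a source key (what both sides accumulate)
def seF (key : String) (frame : List (String × List (String × List String))) : Int :=
  seLen ((PySem.Dict.mk frame).getD "analysis" []) key

-- one step of A on the literal 7-key dict
theorem seStep_lit (b i ic l h t c : Int) (fr : List (String × List (String × List String))) :
    seStep (PySem.Dict.mk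
      [("buttons", b), ("input_fields", i), ("icons", ic), ("links", l),
       ("headings", h), ("text_elements", t), ("containers", c)]) fr
    = PySem.Dict.mk
      [("buttons", b + seF "buttons" fr), ("input_fields", i + seF "input_fields" fr),
       ("icons", ic + seF "icons" fr), ("links", l + seF "links" fr),
       ("headings", h + seF "headings_and_titles" fr),
       ("text_elements", t + seF "body_text" fr),
       ("containers", c + seF "containers_cards" fr)] := by
  rfl

-- A's fold keeps the literal 7-key shape, accumulating the per-key sums
theorem seFold_lit (frames : List (List (String × List (String × List String)))) :
    ∀ (b i ic l h t c : Int),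
    frames.foldl seStep (PySem.Dict.mk
      [("buttons", b), ("input_fields", i), ("icons", ic), ("links", l),
       ("headings", h), ("text_elements", t), ("containers", c)])
    = PySem.Dict.mk
      [("buttons", b + (frames.map (seF "buttons")).sum),
       ("input_fields", i + (frames.map (seF "input_fields")).sum),
       ("icons", ic + (frames.map (seF "icons")).sum),
       ("links", l + (frames.map (seF "links")).sum),
       ("headings", h + (frames.map (seF "headings_and_titles")).sum),
       ("text_elements", t + (frames.map (seF "body_text")).sum),
       ("containers", c + (frames.map (seF "containers_cards")).sum)] := by
  induction frames with
  | nil => intro b i ic l h t c; simp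
  | cons fr rest ih =>
      intro b i ic l h t c
      rw [List.foldl_cons, seStep_lit, ih]
      simp [add_assoc]

-- one frame's inner counting loop, read back at key s (analysis keys duplicate-free)
theorem seInner_getD (al : List (String × List String)) (hnd : (al.map Prod.fst).Nodup)
    (c : PySem.Dict String Int) (s : String) :
    (al.foldl (fun c p => c.insert p.1 (c.getD p.1 0 + p.2.length)) c).getD s 0
      = c.getD s 0 + ((PySem.Dict.mk al).getD s []).length := by
  induction al generalizing c with
  | nil => simp [PySem.Dict.getD_eq_get?_getD, PySem.Dict.get?]
  | cons p rest ih =>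
      obtain ⟨k, v⟩ := p
      simp only [List.map_cons, List.nodup_cons] at hnd
      rw [List.foldl_cons, ih hnd.2]
      by_cases hs : s = k
      · subst hs
        have hnc : (PySem.Dict.mk rest).contains s = false := by
          simp only [PySem.Dict.contains_mk, List.any_eq_false]
          intro q hq
          have hq1 : q.1 ≠ s := fun h => hnd.1 (h ▸ List.mem_map_of_mem hq)
          simpa using hq1
        rw [PySem.Dict.getD_of_not_contains _ _ hnc, PySem.Dict.getD_insert_self]
        simp [PySem.Dict.getD_eq_get?_getD, PySem.Dict.get?_mk_cons]
      · rw [PySem.Dict.getD_insert_of_ne _ _ _ hs]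
        have hne : (k == s) = false := by simp [Ne.symm hs]
        simp [PySem.Dict.getD_eq_get?_getD, PySem.Dict.get?_mk_cons, hne]

-- the analysis dict a frame yields has duplicate-free keys whenever all its inner dicts do
theorem seAnalysis_nodup (fr : List (String × List (String × List String)))
    (h : ∀ p ∈ fr, (p.2.map Prod.fst).Nodup) :
    ((((PySem.Dict.mk fr).getD "analysis" []) : List (String × List String)).map Prod.fst).Nodup := by
  rw [PySem.Dict.getD_eq_get?_getD]
  cases hg : (PySem.Dict.mk fr).get? "analysis" with
  | none => simp
  | some v => simpa using h _ (PySem.Dict.mem_items_of_get?_eq_some _ hg)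

-- the whole counter, read back at key s
theorem seCount_fold (s : String) (frames : List (List (String × List (String × List String))))
    (hpre : Pre_summarize_elements frames) :
    ∀ c : PySem.Dict String Int,
    (frames.foldl (fun counts frame =>
        ((PySem.Dict.mk frame).getD "analysis" []).foldl
          (fun counts p => counts.insert p.1 (counts.getD p.1 0 + p.2.length)) counts) c).getD s 0
      = c.getD s 0 + (frames.map (seF s)).sum := by
  induction frames with
  | nil => intro c; simp
  | cons fr rest ih =>
      intro c
      have hfr : ∀ p ∈ fr, (p.2.map Prod.fst).Nodup := hpre fr (List.mem_cons_self ..)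
      have hrest : Pre_summarize_elements rest := fun f hf => hpre f (List.mem_cons_of_mem _ hf)
      rw [List.foldl_cons, ih hrest, seInner_getD _ (seAnalysis_nodup fr hfr) c s]
      simp [seF, seLen, add_assoc]

theorem seCount_getD (frames : List (List (String × List (String × List String))))
    (hpre : Pre_summarize_elements frames) (s : String) :
    (seCount frames).getD s 0 = (frames.map (seF s)).sum := by
  unfold seCount
  rw [seCount_fold s frames hpre]
  simp [PySem.Dict.getD_empty]

-- ===== VERDICT (by name: the statement is the Claim_ definition above) =====
theorem summarize_elements_spec : Claim_equal_summarize_elements := by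
  intro frames _ hpre
  unfold Spec_summarize_elements summarize_elements summarize_elements_alt
  show (frames.foldl seStep (PySem.Dict.mk
      [("buttons", 0), ("input_fields", 0), ("icons", 0), ("links", 0),
       ("headings", 0), ("text_elements", 0), ("containers", 0)])).items = _
  rw [seFold_lit]
  simp only [List.map_cons, List.map_nil, zero_add,
             seCount_getD frames hpre]
  rfl
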